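-- pv_equiv track=rewrite | github.com/ldnovak/RAIDAR | search/search_api/json_template_maker.py | bool_sorter
-- ===== SOURCE A (Python) =====
-- bool_set = {"must", "filter", "must_not", "should"}
--
-- def bool_sorter(query_list, bool_list):
--     if len(query_list) != len(bool_list) or len(query_list) < 2:
--         raise SyntaxError
--     bool_dict = {}
--     for i in range(len(query_list)):
--         bool_term = bool_list[i]
--         if bool_term not in bool_set:
--             raise SyntaxError
--         query_term = query_list[i]
--         if bool_term not in bool_dict:
--             bool_dict[bool_term] = [query_term]
--         else:
--             bool_dict[bool_term].append(query_term)
--     return bool_dict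
-- ===== SOURCE B (Python) =====
-- bool_set = {"must", "filter", "must_not", "should"}
--
-- def bool_sorter(query_list, bool_list):
--     if len(query_list) != len(bool_list) or len(query_list) < 2:
--         raise SyntaxError
--     if any(b not in bool_set for b in bool_list):
--         raise SyntaxError
--     cats = []
--     for b in bool_list:
--         if b not in cats:
--             cats.append(b)
--     return {c: [q for q, b in zip(query_list, bool_list) if b == c] for c in cats}
-- ===== Notes on version B (the rewrite author's own statement) =====
-- stated objective: alternative
-- what changed: Replaced the single index loop that mutates a dict (insert-or-append per element) by an up-front validity check, a first-appearance scan collecting the distinct categories, and a per-category comprehension over the zipped pairs building each value list by repeated scanning.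
import Mathlib
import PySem

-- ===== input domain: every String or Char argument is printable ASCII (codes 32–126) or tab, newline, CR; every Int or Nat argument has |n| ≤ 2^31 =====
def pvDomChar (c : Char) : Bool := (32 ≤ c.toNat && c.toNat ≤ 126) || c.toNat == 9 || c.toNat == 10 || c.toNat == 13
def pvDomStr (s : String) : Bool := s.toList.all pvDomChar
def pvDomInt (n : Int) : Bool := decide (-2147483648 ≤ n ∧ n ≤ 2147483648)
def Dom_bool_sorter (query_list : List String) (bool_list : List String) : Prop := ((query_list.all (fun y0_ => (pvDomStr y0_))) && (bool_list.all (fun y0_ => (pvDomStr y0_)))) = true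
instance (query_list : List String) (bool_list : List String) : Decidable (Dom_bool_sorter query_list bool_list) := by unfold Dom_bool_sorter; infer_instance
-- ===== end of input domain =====

-- B replaces A's single insert-or-append dict loop by a guard pass, a first-appearance
-- category scan and per-category filtering of the zipped pairs (alternative decomposition, not faster).


-- ===== PORT A =====
-- bool_set = {"must", "filter", "must_not", "should"}
def pvBoolSet : PySem.Set String := PySem.Set.ofList ["must", "filter", "must_not", "should"]

-- A's index loop, in lockstep over the two lists (lengths are equal on the non-raise path);
-- 'none' = the SyntaxError raised when a bool term is outside bool_set.
def boolSorterLoopA : List String → List String → PySem.Dict String (List String) →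
    Option (PySem.Dict String (List String))
  | [], _, d => some d
  | _, [], d => some d
  | q :: qs, b :: bs, d =>
      if PySem.Set.contains pvBoolSet b then
        boolSorterLoopA qs bs
          (if d.contains b then d.modify b [] (fun l => l ++ [q]) else d.insert b [q])
      else none

def bool_sorter (query_list : List String) (bool_list : List String) : List (String × List String) :=
  if query_list.length ≠ bool_list.length ∨ query_list.length < 2 then []  -- raise SyntaxError
  else
    match boolSorterLoopA query_list bool_list PySem.Dict.empty with
    | none => []  -- raise SyntaxError
    | some d => d.items

-- ===== PORT B =====
def bool_sorter_alt (query_list : List String) (bool_list : List String) : List (String × List String) :=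
  if query_list.length ≠ bool_list.length ∨ query_list.length < 2 then []  -- raise SyntaxError
  else if bool_list.any (fun b => !(PySem.Set.contains pvBoolSet b)) then []  -- raise SyntaxError
  else
    let cats := bool_list.foldl (fun cs b => if cs.contains b then cs else cs ++ [b]) ([] : List String)
    cats.map (fun c =>
      (c, ((query_list.zip bool_list).filter (fun p => p.2 == c)).map (fun p => p.1)))

-- ===== PRECONDITION & SPEC =====
-- Pre_ excludes exactly the inputs on which A raises SyntaxError: unequal lengths,
-- fewer than two terms, or a bool term outside bool_set.
def Pre_bool_sorter (query_list : List String) (bool_list : List String) : Prop :=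
  query_list.length = bool_list.length ∧ 2 ≤ query_list.length ∧
    ∀ b ∈ bool_list, b ∈ (["must", "filter", "must_not", "should"] : List String)
instance (query_list : List String) (bool_list : List String) : Decidable (Pre_bool_sorter query_list bool_list) := by unfold Pre_bool_sorter; infer_instance

def pvWitness_bool_sorter : List String × List String :=
  (["a", "b", "c"], ["must", "should", "must"])

def Spec_bool_sorter (query_list : List String) (bool_list : List String) (out : List (String × List String)) : Prop := out = bool_sorter_alt query_list bool_list
instance (query_list : List String) (bool_list : List String) (out : List (String × List String)) : Decidable (Spec_bool_sorter query_list bool_list out) := by unfold Spec_bool_sorter; infer_instance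

-- ===== CLAIM (what is proved, stated in full; the proofs are below) =====
def Claim_equal_bool_sorter : Prop := ∀ (query_list : List String) (bool_list : List String), Dom_bool_sorter query_list bool_list → Pre_bool_sorter query_list bool_list → Spec_bool_sorter query_list bool_list (bool_sorter query_list bool_list)

-- ===== LEMMAS AND PROOFS =====

-- A's branch (insert when absent, append when present) is exactly Dict.modify with default [].
theorem loopA_step (d : PySem.Dict String (List String)) (b q : String) :
    (if d.contains b then d.modify b [] (fun l => l ++ [q]) else d.insert b [q]) =
      d.modify b [] (fun l => l ++ [q]) := by
  by_cases h : d.contains b = true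
  · simp [h]
  · simp only [Bool.not_eq_true] at h
    simp [h, PySem.Dict.modify, PySem.Dict.getD_of_not_contains]

-- When every bool term is in bool_set, A's loop is a total foldl over the zipped (b, q) pairs.
theorem loopA_eq_foldl : ∀ (qs bs : List String) (d : PySem.Dict String (List String)),
    (∀ b ∈ bs, PySem.Set.contains pvBoolSet b = true) →
    boolSorterLoopA qs bs d =
      some ((bs.zip qs).foldl (fun d p => d.modify p.1 [] (fun l => l ++ [p.2])) d)
  | [], bs, d, _ => by cases bs <;> simp [boolSorterLoopA]
  | _ :: _, [], d, _ => by simp [boolSorterLoopA]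
  | q :: qs, b :: bs, d, h => by
    have hb : PySem.Set.contains pvBoolSet b = true := h b (by simp)
    simp only [boolSorterLoopA, hb, if_true, loopA_step, List.zip_cons_cons, List.foldl_cons]
    exact loopA_eq_foldl qs bs _ (fun x hx => h x (by simp [hx]))

theorem filter_swap (ql bl : List String) (c : String) :
    ((bl.zip ql).filter (fun p => p.1 == c)).map (fun p => p.2) =
      ((ql.zip bl).filter (fun p => p.2 == c)).map (fun p => p.1) := by
  induction ql generalizing bl with
  | nil => cases bl <;> simp
  | cons q qs ih =>
    cases bl with
    | nil => simp
    | cons b bs =>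
      by_cases hb : b = c <;> simp [hb, ih bs]

theorem cats_eq_ofList (bl : List String) (acc : List String) :
    bl.foldl (fun cs b => if cs.contains b then cs else cs ++ [b]) acc =
      PySem.Set.update acc bl := by
  induction bl generalizing acc with
  | nil => rfl
  | cons b bs ih =>
    rw [List.foldl_cons, PySem.Set.update_cons, ih]
    congr 1

-- ===== VERDICT (by name: the statement is the Claim_ definition above) =====
theorem bool_sorter_spec : Claim_equal_bool_sorter := by
  intro ql bl _ hpre
  obtain ⟨hlen, h2, hmem⟩ := hpre
  have hset : ∀ b ∈ bl, PySem.Set.contains pvBoolSet b = true := by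
    intro b hb
    rw [PySem.Set.contains_iff]
    show b ∈ PySem.Set.ofList ["must", "filter", "must_not", "should"]
    exact (PySem.Set.mem_ofList _ _).mpr (hmem b hb)
  have hguard : ¬(ql.length ≠ bl.length ∨ ql.length < 2) := by omega
  have hany : bl.any (fun b => !(PySem.Set.contains pvBoolSet b)) = false := by
    rw [List.any_eq_false]
    intro b hb
    rw [hset b hb]
    decide
  have hmapfst : (bl.zip ql).map Prod.fst = bl := by
    apply List.map_fst_zip; omega
  have hkeys : ((bl.zip ql).foldl (fun d p => d.modify p.1 [] (fun l => l ++ [p.2]))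
      PySem.Dict.empty).keys = PySem.Set.ofList bl := by
    rw [PySem.Dict.keys_foldl_modify_key, hmapfst, PySem.Dict.keys_empty,
      PySem.Set.update_nil_left]
  have hnodup := hkeys ▸ PySem.Set.nodup_ofList bl
  have hA : bool_sorter ql bl = ((bl.zip ql).foldl
      (fun d p => d.modify p.1 [] (fun l => l ++ [p.2])) PySem.Dict.empty).items := by
    unfold bool_sorter
    rw [if_neg hguard, loopA_eq_foldl ql bl PySem.Dict.empty hset]
  have hB : bool_sorter_alt ql bl = (PySem.Set.ofList bl).map (fun c =>
      (c, ((ql.zip bl).filter (fun p => p.2 == c)).map (fun p => p.1))) := by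
    unfold bool_sorter_alt
    rw [if_neg hguard, if_neg (by rw [hany]; exact Bool.false_ne_true)]
    rw [show (fun cs b => if cs.contains b = true then cs else cs ++ [b]) =
        (fun (cs : List String) (b : String) => if cs.contains b then cs else cs ++ [b]) from rfl]
    rw [cats_eq_ofList bl [], PySem.Set.update_nil_left]
  unfold Spec_bool_sorter
  rw [hA, hB, PySem.Dict.items_eq_map_keys _ hnodup [], hkeys]
  apply List.map_congr_left
  intro c _
  rw [PySem.Dict.getD_foldl_modify_append, PySem.Dict.getD_empty, List.nil_append, filter_swap]
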